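-- pv_equiv track=rewrite | github.com/kasrahmi/ICD-project | visualize_encoding.py | encode_nrzi
-- ===== SOURCE A (Python) =====
-- def encode_nrzi(data):
--     nrzi_signal = []
--     last_bit = 0
--     for byte in data:
--         for bit in range(7, -1, -1):
--             bit_val = (byte >> bit) & 0x01
--             if bit_val:
--                 last_bit = 1 - last_bit
--             nrzi_signal.append(last_bit)
--     return nrzi_signal
-- ===== SOURCE B (Python) =====
-- def encode_nrzi(data):
--     # Closed-form NRZI: output bit for shift s of a byte = incoming level XOR the parity
--     # (popcount & 1) of the byte's bits from the MSB down to s; the level itself changes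
--     # only once per byte, by the byte's total bit parity. No per-bit toggle state.
--     out = []
--     level = 0
--     for byte in data:
--         b8 = byte & 0xFF
--         out.extend(level ^ ((b8 >> s).bit_count() & 1) for s in range(7, -1, -1))
--         level ^= b8.bit_count() & 1
--     return out
-- ===== Notes on version B (the rewrite author's own statement) =====
-- stated objective: alternative
-- what changed: Replaces A's per-bit toggle state machine by a stateless closed form: each output bit is the incoming level XOR the popcount parity of the byte's leading bits ((b8 >> s).bit_count() & 1), and the level is updated only once per byte by the byte's total parity.
import Mathlib
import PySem

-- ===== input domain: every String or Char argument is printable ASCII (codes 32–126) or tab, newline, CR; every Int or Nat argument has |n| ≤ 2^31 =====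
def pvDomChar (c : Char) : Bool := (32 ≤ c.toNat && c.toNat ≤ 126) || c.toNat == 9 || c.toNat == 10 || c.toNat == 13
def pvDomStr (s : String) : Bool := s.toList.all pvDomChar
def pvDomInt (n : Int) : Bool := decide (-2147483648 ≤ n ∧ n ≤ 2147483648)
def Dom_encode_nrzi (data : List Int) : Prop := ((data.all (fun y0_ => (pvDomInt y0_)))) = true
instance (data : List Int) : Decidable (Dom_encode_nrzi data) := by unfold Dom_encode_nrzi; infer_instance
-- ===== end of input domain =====

-- B replaces A's per-bit toggle state machine by a stateless popcount-parity closed form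
-- (output bit = level XOR bit_count(b8 >> s) & 1; level updated once per byte).

-- ===== PORT A =====
-- '(byte >> bit) & 0x01' of A; bit comes from range(7,-1,-1) so bit ≥ 0 and '.toNat' is exact
def pvBit (x b : Int) : Int := PySem.Int.band (x >>> b.toNat) 1

-- literal port of A: nested for over bytes and range(7,-1,-1), state = (nrzi_signal, last_bit)
def encode_nrzi (data : List Int) : List Int :=
  (data.foldl (fun (st : List Int × Int) byte =>
      (PySem.List.pyRange 7 (-1) (-1)).foldl (fun (st : List Int × Int) bit =>
        let bit_val := pvBit byte bit
        let last_bit := if bit_val ≠ 0 then 1 - st.2 else st.2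
        (st.1 ++ [last_bit], last_bit)) st)
    ([], 0)).1

-- ===== PORT B =====
-- literal port of Source B: per byte, b8 = byte & 0xFF, extend with level ^ (bit_count(b8 >> s) & 1)
-- for s in range(7,-1,-1), then level ^= bit_count(b8) & 1  (bit_count = PySem.Int.bitCount)
def encode_nrzi_alt (data : List Int) : List Int :=
  (data.foldl (fun (st : List Int × Int) byte =>
      let b8 := PySem.Int.band byte 255
      (st.1 ++ (PySem.List.pyRange 7 (-1) (-1)).map (fun s =>
          PySem.Int.bxor st.2 (PySem.Int.band ((PySem.Int.bitCount (b8 >>> s.toNat) : Nat) : Int) 1)),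
       PySem.Int.bxor st.2 (PySem.Int.band ((PySem.Int.bitCount b8 : Nat) : Int) 1)))
    ([], 0)).1

-- ===== PRECONDITION & SPEC =====
def Spec_encode_nrzi (data : List Int) (out : List Int) : Prop := out = encode_nrzi_alt data
instance (data : List Int) (out : List Int) : Decidable (Spec_encode_nrzi data out) := by unfold Spec_encode_nrzi; infer_instance

-- ===== CLAIM (what is proved, stated in full; the proofs are below) =====
def Claim_equal_encode_nrzi : Prop := ∀ (data : List Int), Dom_encode_nrzi data → Spec_encode_nrzi data (encode_nrzi data)

-- ===== LEMMAS AND PROOFS =====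

-- the common reference form both ports are reduced to: the XOR prefix scan of the flat bit list
def pvXorScan (level : Int) : List Int → List Int
  | [] => []
  | bit :: bs => let l := PySem.Int.bxor level bit; l :: pvXorScan l bs

def pvBits (data : List Int) : List Int :=
  data.flatMap (fun byte => (PySem.List.pyRange 7 (-1) (-1)).map (pvBit byte))

-- parity of the bits of byte & 0xFF from the MSB down to position k, as an Int in {0,1}
def pvPar (byte : Int) (k : Nat) : Int :=
  ((PySem.Int.bitCount (PySem.Int.band byte 255 >>> k) % 2 : Nat) : Int)

-- each extracted bit is 0 or 1
theorem pv_band_one_01 (x : Int) : PySem.Int.band x 1 = 0 ∨ PySem.Int.band x 1 = 1 := by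
  rw [PySem.Int.band_one]
  have h1 : 0 ≤ PySem.Int.mod x 2 := PySem.Int.mod_nonneg x (by norm_num)
  have h2 : PySem.Int.mod x 2 < 2 := PySem.Int.mod_lt x (by norm_num)
  omega

-- on {0,1} values, A's conditional toggle is exactly XOR
theorem pv_toggle_eq_bxor (last b : Int) (hl : last = 0 ∨ last = 1) (hb : b = 0 ∨ b = 1) :
    (if b ≠ 0 then 1 - last else last) = PySem.Int.bxor last b := by
  rcases hl with rfl | rfl <;> rcases hb with rfl | rfl <;> decide

theorem pv_bxor_01 (last b : Int) (hl : last = 0 ∨ last = 1) (hb : b = 0 ∨ b = 1) :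
    PySem.Int.bxor last b = 0 ∨ PySem.Int.bxor last b = 1 := by
  rcases hl with rfl | rfl <;> rcases hb with rfl | rfl <;> decide

theorem pv_foldl_bxor_01 (bs : List Int) (last : Int)
    (hbs : ∀ b ∈ bs, b = 0 ∨ b = 1) (hl : last = 0 ∨ last = 1) :
    bs.foldl PySem.Int.bxor last = 0 ∨ bs.foldl PySem.Int.bxor last = 1 := by
  induction bs generalizing last with
  | nil => exact hl
  | cons b bs ih =>
      exact ih (PySem.Int.bxor last b) (fun x hx => hbs x (List.mem_cons_of_mem _ hx))
        (pv_bxor_01 last b hl (hbs b (List.mem_cons_self ..)))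

theorem pv_xorScan_append (xs ys : List Int) (a : Int) :
    pvXorScan a (xs ++ ys) = pvXorScan a xs ++ pvXorScan (xs.foldl PySem.Int.bxor a) ys := by
  induction xs generalizing a with
  | nil => simp [pvXorScan]
  | cons x xs ih => simp [pvXorScan, ih]

-- A's flattened inner fold, started at any (sig, last) with last ∈ {0,1}, appends the XOR scan
theorem pv_fold_scan (bs : List Int) (sig : List Int) (last : Int)
    (hbs : ∀ b ∈ bs, b = 0 ∨ b = 1) (hl : last = 0 ∨ last = 1) :
    bs.foldl (fun (st : List Int × Int) b =>
        (st.1 ++ [if b ≠ 0 then 1 - st.2 else st.2], if b ≠ 0 then 1 - st.2 else st.2)) (sig, last)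
      = (sig ++ pvXorScan last bs, bs.foldl PySem.Int.bxor last) := by
  induction bs generalizing sig last with
  | nil => simp [pvXorScan]
  | cons b bs ih =>
      have hb := hbs b (List.mem_cons_self ..)
      have hstep := pv_toggle_eq_bxor last b hl hb
      simp only [List.foldl_cons, hstep]
      rw [ih (sig ++ [PySem.Int.bxor last b]) (PySem.Int.bxor last b)
        (fun x hx => hbs x (List.mem_cons_of_mem _ hx)) (pv_bxor_01 last b hl hb)]
      simp [pvXorScan]

-- one byte of A's inner loop = the XOR scan of that byte's 8 extracted bits
theorem pv_inner (byte : Int) (sig : List Int) (last : Int) (hl : last = 0 ∨ last = 1) :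
    (PySem.List.pyRange 7 (-1) (-1)).foldl (fun (st : List Int × Int) bit =>
        (st.1 ++ [if pvBit byte bit ≠ 0 then 1 - st.2 else st.2],
          if pvBit byte bit ≠ 0 then 1 - st.2 else st.2)) (sig, last)
      = (sig ++ pvXorScan last ((PySem.List.pyRange 7 (-1) (-1)).map (pvBit byte)),
         ((PySem.List.pyRange 7 (-1) (-1)).map (pvBit byte)).foldl PySem.Int.bxor last) := by
  rw [← List.foldl_map (f := pvBit byte)
    (g := fun (st : List Int × Int) b =>
      (st.1 ++ [if b ≠ 0 then 1 - st.2 else st.2], if b ≠ 0 then 1 - st.2 else st.2))]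
  exact pv_fold_scan _ sig last
    (by intro b hb; rcases List.mem_map.mp hb with ⟨k, _, rfl⟩; exact pv_band_one_01 _) hl

theorem pv_pvBit_01 (byte : Int) : ∀ b ∈ (PySem.List.pyRange 7 (-1) (-1)).map (pvBit byte),
    b = 0 ∨ b = 1 := by
  intro b hb
  rcases List.mem_map.mp hb with ⟨k, _, rfl⟩
  exact pv_band_one_01 _

-- A's outer fold over bytes, generalized over accumulated signal and level
theorem pv_outer (data : List Int) (sig : List Int) (last : Int) (hl : last = 0 ∨ last = 1) :
    data.foldl (fun (st : List Int × Int) byte =>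
        (PySem.List.pyRange 7 (-1) (-1)).foldl (fun (st : List Int × Int) bit =>
          (st.1 ++ [if pvBit byte bit ≠ 0 then 1 - st.2 else st.2],
            if pvBit byte bit ≠ 0 then 1 - st.2 else st.2)) st) (sig, last)
      = (sig ++ pvXorScan last (pvBits data), (pvBits data).foldl PySem.Int.bxor last) := by
  induction data generalizing sig last with
  | nil => simp [pvBits, pvXorScan]
  | cons byte rest ih =>
      simp only [List.foldl_cons]
      rw [pv_inner byte sig last hl, ih _ _ (pv_foldl_bxor_01 _ last (pv_pvBit_01 byte) hl)]
      simp [pvBits, pv_xorScan_append]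

-- ===== B-side lemmas =====

-- byte & 0xFF is byte mod 256
theorem pv_band255 (byte : Int) : PySem.Int.band byte 255 = byte % 256 := by
  by_cases h : 0 ≤ byte
  · rw [PySem.Int.band_of_nonneg h (by norm_num)]
    have h2 : byte.toNat &&& (255 : Int).toNat = byte.toNat % 256 := by
      have := Nat.and_two_pow_sub_one_eq_mod byte.toNat 8
      norm_num at this ⊢; exact this
    rw [h2]; omega
  · have h255 : (0 : Int) ≤ 255 := by norm_num
    simp only [PySem.Int.band, if_neg h, if_pos h255]
    have h2 : (255 : Int).toNat &&& (-byte - 1).toNat = (-byte - 1).toNat % 256 := by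
      rw [Nat.and_comm]
      have := Nat.and_two_pow_sub_one_eq_mod (-byte - 1).toNat 8
      norm_num at this ⊢; exact this
    rw [h2]; omega

theorem pv_b8_cast (byte : Int) : PySem.Int.band byte 255 = (((byte % 256).toNat : Nat) : Int) := by
  rw [pv_band255]; omega

-- A's bit through the Nat view of byte & 0xFF
theorem pv_bit_bridge (byte : Int) (k : Nat) (hk : k ≤ 7) :
    pvBit byte (k : Int) = ((((byte % 256).toNat >>> k) % 2 : Nat) : Int) := by
  unfold pvBit
  rw [PySem.Int.band_one]
  have h1 : ((k : Int)).toNat = k := by omega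
  rw [h1, PySem.Int.mod_eq_emod_of_pos (by norm_num), Int.shiftRight_eq_div_pow,
    Nat.shiftRight_eq_div_pow]
  interval_cases k <;> (norm_num; omega)

theorem pv_par_01 (byte : Int) (k : Nat) : pvPar byte k = 0 ∨ pvPar byte k = 1 := by
  unfold pvPar; omega

theorem pv_par_top (byte : Int) : pvPar byte 8 = 0 := by
  unfold pvPar
  rw [pv_b8_cast]
  have h : ((byte % 256).toNat >>> 8) = 0 := by
    rw [Nat.shiftRight_eq_div_pow]; omega
  rw [show (((((byte % 256).toNat : Nat)) : Int) >>> (8 : Nat)) = (((byte % 256).toNat >>> 8 : Nat) : Int) from rfl,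
    h]
  simp [PySem.Int.bitCount_zero]

-- one halving step of the popcount parity: par k = par (k+1) XOR bit k
theorem pv_par_step (byte : Int) (k : Nat) (hk : k ≤ 7) :
    pvPar byte k = PySem.Int.bxor (pvPar byte (k + 1)) (pvBit byte (k : Int)) := by
  unfold pvPar
  rw [pv_bit_bridge byte k hk, pv_b8_cast]
  rw [show (((((byte % 256).toNat : Nat)) : Int) >>> k) = (((byte % 256).toNat >>> k : Nat) : Int) from rfl,
    show (((((byte % 256).toNat : Nat)) : Int) >>> (k + 1)) = (((byte % 256).toNat >>> (k + 1) : Nat) : Int) from rfl]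
  set nb := (byte % 256).toNat with hnb
  by_cases h0 : nb >>> k = 0
  · have h1 : nb >>> (k + 1) = 0 := by
      rw [Nat.shiftRight_succ, h0]
    rw [h0, h1]
    simp [PySem.Int.bitCount_zero]
  · have hpos : 0 < nb >>> k := Nat.pos_of_ne_zero h0
    have hrec := PySem.Int.bitCount_natCast hpos
    have hdiv : (nb >>> k) / 2 = nb >>> (k + 1) := by rw [Nat.shiftRight_succ]
    rw [hrec, hdiv]
    set c := PySem.Int.bitCount (((nb >>> (k + 1) : Nat)) : Int) with hc
    have hb : (nb >>> k) % 2 = 0 ∨ (nb >>> k) % 2 = 1 := by omega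
    have hp : c % 2 = 0 ∨ c % 2 = 1 := by omega
    rw [Nat.add_mod]
    have hbb : (nb >>> k) % 2 % 2 = (nb >>> k) % 2 := by omega
    rw [hbb]
    rcases hb with hb | hb <;> rcases hp with hp | hp <;> rw [hb, hp] <;> decide

-- XOR re-association on {0,1} values, stated for the exact shapes the scan needs
theorem pv_xor3 (level p b q : Int) (hl : level = 0 ∨ level = 1) (hp : p = 0 ∨ p = 1)
    (hb : b = 0 ∨ b = 1) (hq : q = PySem.Int.bxor p b) :
    PySem.Int.bxor level q = PySem.Int.bxor (PySem.Int.bxor level p) b := by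
  subst hq
  rcases hl with rfl | rfl <;> rcases hp with rfl | rfl <;> rcases hb with rfl | rfl <;> decide

-- B's per-bit closed form term equals pvPar
theorem pv_term_eq (byte : Int) (i : Int) :
    PySem.Int.band ((PySem.Int.bitCount (PySem.Int.band byte 255 >>> ((i.toNat : Nat) : Int)) : Nat) : Int) 1
      = pvPar byte i.toNat := by
  unfold pvPar
  rw [Int.shiftRight_natCast_right, PySem.Int.band_one]
  exact_mod_cast PySem.Int.mod_natCast (PySem.Int.bitCount (PySem.Int.band byte 255 >>> i.toNat)) 2

-- B's stateless map over a tail range equals the XOR scan of A's bits, given the parity above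
theorem pv_scanB (byte : Int) : ∀ (s : Nat), s ≤ 7 → ∀ level : Int, (level = 0 ∨ level = 1) →
    (PySem.List.pyRange (s : Int) (-1) (-1)).map (fun i =>
        PySem.Int.bxor level (PySem.Int.band ((PySem.Int.bitCount (PySem.Int.band byte 255 >>> ((i.toNat : Nat) : Int)) : Nat) : Int) 1))
      = pvXorScan (PySem.Int.bxor level (pvPar byte (s + 1)))
          ((PySem.List.pyRange (s : Int) (-1) (-1)).map (pvBit byte)) := by
  intro s
  induction s with
  | zero =>
      intro _ level hl
      rw [PySem.List.pyRange_neg_one_cons (by norm_num),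
        PySem.List.pyRange_neg_one_eq_nil (by norm_num)]
      simp only [List.map_cons, List.map_nil, pvXorScan]
      rw [pv_term_eq byte ((0 : Nat) : Int)]
      simp only [Int.toNat_natCast]
      have hstep := pv_par_step byte 0 (by norm_num)
      rw [pv_xor3 level (pvPar byte 1) (pvBit byte ((0 : Nat) : Int)) (pvPar byte 0) hl (pv_par_01 byte 1)
        (pv_band_one_01 _) hstep]
  | succ n ih =>
      intro hn level hl
      have hcons : PySem.List.pyRange ((n + 1 : Nat) : Int) (-1) (-1)
          = ((n + 1 : Nat) : Int) :: PySem.List.pyRange ((n : Nat) : Int) (-1) (-1) := by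
        have := PySem.List.pyRange_neg_one_cons (a := ((n + 1 : Nat) : Int)) (b := -1)
          (by push_cast; omega)
        rw [this]; congr 1; push_cast; ring
      rw [hcons]
      simp only [List.map_cons, pvXorScan]
      rw [pv_term_eq byte ((n + 1 : Nat) : Int)]
      simp only [Int.toNat_natCast]
      have hstep := pv_par_step byte (n + 1) (by omega)
      have hbit01 : pvBit byte ((n + 1 : Nat) : Int) = 0 ∨ pvBit byte ((n + 1 : Nat) : Int) = 1 :=
        pv_band_one_01 _
      have hhead : PySem.Int.bxor level (pvPar byte (n + 1))
          = PySem.Int.bxor (PySem.Int.bxor level (pvPar byte (n + 1 + 1))) (pvBit byte ((n + 1 : Nat) : Int)) := by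
        exact pv_xor3 level (pvPar byte (n + 1 + 1)) _ _ hl (pv_par_01 byte (n + 1 + 1)) hbit01 hstep
      rw [← hhead, ih (by omega) level hl]

-- folding XOR over the tail bits lands on the total parity
theorem pv_foldB (byte : Int) : ∀ (s : Nat), s ≤ 7 → ∀ level : Int, (level = 0 ∨ level = 1) →
    ((PySem.List.pyRange (s : Int) (-1) (-1)).map (pvBit byte)).foldl PySem.Int.bxor
        (PySem.Int.bxor level (pvPar byte (s + 1)))
      = PySem.Int.bxor level (pvPar byte 0) := by
  intro s
  induction s with
  | zero =>
      intro _ level hl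
      rw [PySem.List.pyRange_neg_one_cons (by norm_num),
        PySem.List.pyRange_neg_one_eq_nil (by norm_num)]
      simp only [List.map_cons, List.map_nil, List.foldl_cons, List.foldl_nil]
      have hstep := pv_par_step byte 0 (by norm_num)
      exact (pv_xor3 level (pvPar byte 1) (pvBit byte 0) (pvPar byte 0) hl (pv_par_01 byte 1)
        (pv_band_one_01 _) hstep).symm
  | succ n ih =>
      intro hn level hl
      have hcons : PySem.List.pyRange ((n + 1 : Nat) : Int) (-1) (-1)
          = ((n + 1 : Nat) : Int) :: PySem.List.pyRange ((n : Nat) : Int) (-1) (-1) := by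
        have := PySem.List.pyRange_neg_one_cons (a := ((n + 1 : Nat) : Int)) (b := -1)
          (by push_cast; omega)
        rw [this]; congr 1; push_cast; ring
      rw [hcons]
      simp only [List.map_cons, List.foldl_cons]
      have hstep := pv_par_step byte (n + 1) (by omega)
      have hhead : PySem.Int.bxor level (pvPar byte (n + 1))
          = PySem.Int.bxor (PySem.Int.bxor level (pvPar byte (n + 2))) (pvBit byte ((n + 1 : Nat) : Int)) := by
        push_cast at hstep ⊢
        exact pv_xor3 level (pvPar byte (n + 2)) _ _ hl (pv_par_01 byte (n + 2))
          (pv_band_one_01 _) hstep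
      rw [show ((n : Nat) + 1 + 1) = (n + 2) from rfl] at *
      rw [← hhead]
      exact ih (by omega) level hl

-- B's new level term is the total-parity update
theorem pv_newlevel (byte : Int) (level : Int) (hl : level = 0 ∨ level = 1) :
    PySem.Int.bxor level (PySem.Int.band ((PySem.Int.bitCount (PySem.Int.band byte 255) : Nat) : Int) 1)
      = ((PySem.List.pyRange 7 (-1) (-1)).map (pvBit byte)).foldl PySem.Int.bxor level := by
  have h0 : PySem.Int.band byte 255
      = PySem.Int.band byte 255 >>> (((((0 : Nat) : Int)).toNat : Nat) : Int) := by
    rw [Int.shiftRight_natCast_right]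
    exact (Int.shiftRight_zero _).symm
  rw [h0, pv_term_eq byte ((0 : Nat) : Int)]
  simp only [Int.toNat_natCast]
  have h7 := pv_foldB byte 7 (by norm_num) level hl
  rw [show (((7 : Nat)) : Int) = (7 : Int) from rfl] at h7
  rw [h7.symm, pv_par_top byte]
  simp

-- B's per-byte map is the XOR scan of A's bits
theorem pv_mapB (byte : Int) (level : Int) (hl : level = 0 ∨ level = 1) :
    (PySem.List.pyRange 7 (-1) (-1)).map (fun i =>
        PySem.Int.bxor level (PySem.Int.band ((PySem.Int.bitCount (PySem.Int.band byte 255 >>> ((i.toNat : Nat) : Int)) : Nat) : Int) 1))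
      = pvXorScan level ((PySem.List.pyRange 7 (-1) (-1)).map (pvBit byte)) := by
  have h := pv_scanB byte 7 (by norm_num) level hl
  rw [show (((7 : Nat)) : Int) = (7 : Int) from rfl] at h
  rw [h, pv_par_top byte]
  simp

-- B's outer fold over bytes, generalized over accumulated signal and level
theorem pvB_outer (data : List Int) (sig : List Int) (level : Int) (hl : level = 0 ∨ level = 1) :
    data.foldl (fun (st : List Int × Int) byte =>
        let b8 := PySem.Int.band byte 255
        (st.1 ++ (PySem.List.pyRange 7 (-1) (-1)).map (fun s =>
            PySem.Int.bxor st.2 (PySem.Int.band ((PySem.Int.bitCount (b8 >>> s.toNat) : Nat) : Int) 1)),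
         PySem.Int.bxor st.2 (PySem.Int.band ((PySem.Int.bitCount b8 : Nat) : Int) 1))) (sig, level)
      = (sig ++ pvXorScan level (pvBits data), (pvBits data).foldl PySem.Int.bxor level) := by
  induction data generalizing sig level with
  | nil => simp [pvBits, pvXorScan]
  | cons byte rest ih =>
      simp only [List.foldl_cons]
      rw [show (let b8 := PySem.Int.band byte 255
          ((sig, level).1 ++ (PySem.List.pyRange 7 (-1) (-1)).map (fun s =>
              PySem.Int.bxor (sig, level).2 (PySem.Int.band ((PySem.Int.bitCount (b8 >>> s.toNat) : Nat) : Int) 1)),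
           PySem.Int.bxor (sig, level).2 (PySem.Int.band ((PySem.Int.bitCount b8 : Nat) : Int) 1)))
        = (sig ++ pvXorScan level ((PySem.List.pyRange 7 (-1) (-1)).map (pvBit byte)),
           ((PySem.List.pyRange 7 (-1) (-1)).map (pvBit byte)).foldl PySem.Int.bxor level) from by
          simp only []
          rw [pv_mapB byte level hl, pv_newlevel byte level hl]]
      rw [ih _ _ (pv_foldl_bxor_01 _ level (pv_pvBit_01 byte) hl)]
      simp [pvBits, pv_xorScan_append]

-- ===== VERDICT (by name: the statement is the Claim_ definition above) =====
theorem encode_nrzi_spec : Claim_equal_encode_nrzi := by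
  intro data _
  show encode_nrzi data = encode_nrzi_alt data
  unfold encode_nrzi encode_nrzi_alt
  rw [pv_outer data [] 0 (Or.inl rfl), pvB_outer data [] 0 (Or.inl rfl)]
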